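-- pv_equiv track=rewrite | github.com/roshankraveendrababu/coding-files | contest_solutions/codeforces/set_of_strangers.py | no_of_iter
-- ===== SOURCE A (Python) =====
-- def color_cnt(color_pos,grid):
--     val=1
--     neighbours=[[1,0],[-1,0],[0,1],[0,-1]]
--     for dx,dy in color_pos:
--         for nx,ny in neighbours:
--             new_x,new_y=dx+nx,dy+ny
--             if (new_x,new_y) in color_pos:
--                 val+=1
--                 return val
--     return val
--
-- def no_of_iter(n,m,grid):
--     color_map={}
--     cnt=0
--     for i in range(n):
--         for j in range(m):
--             if grid[i][j] not in color_map:
--                 color_map[grid[i][j]]=set()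
--             color_map[grid[i][j]].add((i,j))
--     for co_ordinates in color_map.values():
--         cnt+=color_cnt(co_ordinates,grid)
--
--     if cnt>len(color_map):
--         return cnt-2
--     else:
--         return cnt-1
-- ===== SOURCE B (Python) =====
-- def no_of_iter(n, m, grid):
--     distinct = set()
--     adjacent = set()
--     for i in range(n):
--         for j in range(m):
--             c = grid[i][j]
--             distinct.add(c)
--             if j + 1 < m and grid[i][j + 1] == c:
--                 adjacent.add(c)
--             if i + 1 < n and grid[i + 1][j] == c:
--                 adjacent.add(c)
--     k = len(distinct)
--     a = len(adjacent)
--     return k + a - 2 if a else k - 1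
-- ===== Notes on version B (the rewrite author's own statement) =====
-- stated objective: simpler
-- what changed: B drops A's color->positions dictionary and the per-color 4-neighbour scan with early return; it makes one pass over the cells, collecting the distinct colors and the colors that have an equal right or down neighbour into two sets, and computes C+adj-2 (or C-1 if no adjacency) from their sizes.
import Mathlib
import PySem

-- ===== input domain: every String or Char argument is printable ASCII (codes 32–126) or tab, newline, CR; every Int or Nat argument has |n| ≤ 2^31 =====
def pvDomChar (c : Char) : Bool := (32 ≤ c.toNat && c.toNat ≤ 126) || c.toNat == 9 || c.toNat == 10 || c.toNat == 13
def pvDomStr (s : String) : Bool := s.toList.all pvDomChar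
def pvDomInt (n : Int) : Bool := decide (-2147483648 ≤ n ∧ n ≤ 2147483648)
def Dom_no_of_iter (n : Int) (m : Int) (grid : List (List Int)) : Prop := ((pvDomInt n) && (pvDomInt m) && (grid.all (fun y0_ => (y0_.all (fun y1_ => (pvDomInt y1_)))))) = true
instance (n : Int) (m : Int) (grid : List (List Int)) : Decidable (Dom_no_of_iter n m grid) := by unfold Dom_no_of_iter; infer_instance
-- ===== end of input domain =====

-- B replaces A's color->positions dictionary and per-color 4-neighbour scan by one pass over the
-- cells collecting two sets (distinct colors, colors with an equal right/down neighbour); simpler.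

-- ===== PORT A =====
-- grid[i][j]: pyGetD is exact for the in-range accesses admitted by Pre_no_of_iter
def cellAt (grid : List (List Int)) (i j : Int) : Int :=
  PySem.List.pyGetD (PySem.List.pyGetD grid i []) j 0

def neighbours : List (Int × Int) := [(1, 0), (-1, 0), (0, 1), (0, -1)]

-- inner 'for nx,ny in neighbours' loop of color_cnt; on a hit 'val+=1; return val' returns 2
def colorCntInner (p : Int × Int) (color_pos : List (Int × Int)) :
    List (Int × Int) → Option Int
  | [] => none
  | d :: rest =>
    if (p.1 + d.1, p.2 + d.2) ∈ color_pos then some 2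
    else colorCntInner p color_pos rest

-- outer 'for dx,dy in color_pos' loop (the returned value does not depend on the set's iteration order)
def colorCntOuter (color_pos : List (Int × Int)) : List (Int × Int) → Int
  | [] => 1
  | p :: rest =>
    match colorCntInner p color_pos neighbours with
    | some v => v
    | none => colorCntOuter color_pos rest

def color_cnt (color_pos : PySem.Set (Int × Int)) : Int :=
  colorCntOuter color_pos color_pos

def no_of_iter (n : Int) (m : Int) (grid : List (List Int)) : Int :=
  let color_map : PySem.Dict Int (PySem.Set (Int × Int)) :=
    (PySem.List.pyRange 0 n 1).foldl (fun cm i =>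
      (PySem.List.pyRange 0 m 1).foldl (fun cm j =>
        let c := cellAt grid i j
        let cm := if cm.contains c then cm else cm.insert c PySem.Set.empty
        cm.insert c (PySem.Set.add (cm.getD c PySem.Set.empty) (i, j))) cm)
      PySem.Dict.empty
  let cnt : Int := color_map.values.foldl (fun acc s => acc + color_cnt s) 0
  if cnt > (color_map.size : Int) then cnt - 2 else cnt - 1

-- ===== PORT B =====
def no_of_iter_alt (n : Int) (m : Int) (grid : List (List Int)) : Int :=
  let st : PySem.Set Int × PySem.Set Int :=
    (PySem.List.pyRange 0 n 1).foldl (fun st i =>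
      (PySem.List.pyRange 0 m 1).foldl (fun st j =>
        let c := cellAt grid i j
        let distinct := PySem.Set.add st.1 c
        let adjacent :=
          if j + 1 < m ∧ cellAt grid i (j + 1) = c then PySem.Set.add st.2 c else st.2
        let adjacent :=
          if i + 1 < n ∧ cellAt grid (i + 1) j = c then PySem.Set.add adjacent c else adjacent
        (distinct, adjacent)) st)
      (PySem.Set.empty, PySem.Set.empty)
  let k : Int := st.1.length
  let a : Int := st.2.length
  if a ≠ 0 then k + a - 2 else k - 1

-- ===== PRECONDITION & SPEC =====
-- Pre_ excludes exactly the inputs where Python A raises IndexError: when the loops access a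
-- cell (0 < m and some accessed row missing or shorter than m). A returns on everything else.
def Pre_no_of_iter (n : Int) (m : Int) (grid : List (List Int)) : Prop :=
  0 < m → (n ≤ (grid.length : Int) ∧ ∀ row ∈ grid.take n.toNat, m ≤ (row.length : Int))
instance (n : Int) (m : Int) (grid : List (List Int)) : Decidable (Pre_no_of_iter n m grid) := by
  unfold Pre_no_of_iter; infer_instance

def pvWitness_no_of_iter : Int × Int × List (List Int) := (2, 2, [[1, 1], [2, 3]])

def Spec_no_of_iter (n : Int) (m : Int) (grid : List (List Int)) (out : Int) : Prop := out = no_of_iter_alt n m grid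
instance (n : Int) (m : Int) (grid : List (List Int)) (out : Int) : Decidable (Spec_no_of_iter n m grid out) := by unfold Spec_no_of_iter; infer_instance

-- ===== CLAIM (what is proved, stated in full; the proofs are below) =====
def Claim_equal_no_of_iter : Prop := ∀ (n : Int) (m : Int) (grid : List (List Int)), Dom_no_of_iter n m grid → Pre_no_of_iter n m grid → Spec_no_of_iter n m grid (no_of_iter n m grid)

-- ===== LEMMAS AND PROOFS =====

-- row-major list of the visited cell coordinates
def cellsOf (n m : Int) : List (Int × Int) :=
  (PySem.List.pyRange 0 n 1).flatMap (fun i => (PySem.List.pyRange 0 m 1).map (fun j => (i, j)))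

def cellF (grid : List (List Int)) (p : Int × Int) : Int := cellAt grid p.1 p.2

-- A's grouping step, on a cell pair
def stepA (grid : List (List Int)) (cm : PySem.Dict Int (PySem.Set (Int × Int)))
    (p : Int × Int) : PySem.Dict Int (PySem.Set (Int × Int)) :=
  let c := cellF grid p
  let cm := if cm.contains c then cm else cm.insert c PySem.Set.empty
  cm.insert c (PySem.Set.add (cm.getD c PySem.Set.empty) p)

def addIf (b : Prop) [Decidable b] (s : PySem.Set Int) (c : Int) : PySem.Set Int :=
  if b then PySem.Set.add s c else s

-- B's adjacency step, on a cell pair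
def stepB (n m : Int) (grid : List (List Int)) (s : PySem.Set Int) (p : Int × Int) :
    PySem.Set Int :=
  addIf (p.1 + 1 < n ∧ cellAt grid (p.1 + 1) p.2 = cellF grid p)
    (addIf (p.2 + 1 < m ∧ cellAt grid p.1 (p.2 + 1) = cellF grid p) s (cellF grid p))
    (cellF grid p)

lemma foldl_nested {σ : Type} (n m : Int) (f : σ → Int × Int → σ) (init : σ) :
    (PySem.List.pyRange 0 n 1).foldl (fun s i =>
      (PySem.List.pyRange 0 m 1).foldl (fun s j => f s (i, j)) s) init
    = (cellsOf n m).foldl f init := by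
  simp [cellsOf, List.foldl_flatMap, List.foldl_map]

lemma mem_cellsOf {n m : Int} {p : Int × Int} :
    p ∈ cellsOf n m ↔ 0 ≤ p.1 ∧ p.1 < n ∧ 0 ≤ p.2 ∧ p.2 < m := by
  rcases p with ⟨i, j⟩
  simp only [cellsOf, List.mem_flatMap, List.mem_map, PySem.List.mem_pyRange_one, Prod.mk.injEq]
  constructor
  · rintro ⟨a, ⟨h1, h2⟩, b, ⟨h3, h4⟩, he1, he2⟩
    subst he1; subst he2; exact ⟨h1, h2, h3, h4⟩
  · rintro ⟨h1, h2, h3, h4⟩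
    exact ⟨i, ⟨h1, h2⟩, j, ⟨h3, h4⟩, rfl, rfl⟩

lemma nodup_cellsOf (n m : Int) : (cellsOf n m).Nodup := by
  unfold cellsOf
  rw [List.nodup_flatMap]
  constructor
  · exact fun i _ => List.Nodup.map (fun a b h => by simpa using h)
      (PySem.List.nodup_pyRange_one 0 m)
  · have h := PySem.List.pairwise_lt_pyRange_one 0 n
    refine h.imp ?_
    intro a b hab p hp hq
    simp only [List.mem_map] at hp hq
    rcases hp with ⟨x, _, hx⟩
    rcases hq with ⟨y, _, hy⟩
    have h1 : a = p.1 := by rw [← hx]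
    have h2 : b = p.1 := by rw [← hy]
    omega

lemma a_fold_eq (n m : Int) (grid : List (List Int)) :
    no_of_iter n m grid =
      (let cm := (cellsOf n m).foldl (stepA grid) PySem.Dict.empty
       let cnt : Int := cm.values.foldl (fun acc s => acc + color_cnt s) 0
       if cnt > (cm.size : Int) then cnt - 2 else cnt - 1) := by
  unfold no_of_iter
  rw [← foldl_nested (f := stepA grid)]
  simp only [stepA, cellF]

lemma alt_fold_eq (n m : Int) (grid : List (List Int)) :
    no_of_iter_alt n m grid =
      (let st := (cellsOf n m).foldl
        (fun st p => (PySem.Set.add st.1 (cellF grid p), stepB n m grid st.2 p))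
        (PySem.Set.empty, PySem.Set.empty)
       let k : Int := st.1.length
       let a : Int := st.2.length
       if a ≠ 0 then k + a - 2 else k - 1) := by
  unfold no_of_iter_alt
  rw [← foldl_nested (f := fun st p => (PySem.Set.add st.1 (cellF grid p), stepB n m grid st.2 p))]
  simp only [stepB, addIf, cellF]

lemma groupItems (grid : List (List Int)) (L : List (Int × Int)) (hL : L.Nodup) :
    (L.foldl (stepA grid) PySem.Dict.empty).items
      = (PySem.List.dedup (L.map (cellF grid))).map
          (fun c => (c, L.filter (fun p => cellF grid p == c))) := by
  induction L using List.reverseRecOn with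
  | nil => rfl
  | append_singleton L' p ih =>
    rw [List.nodup_append] at hL
    obtain ⟨hL', -, hdisj⟩ := hL
    have hpL' : p ∉ L' := fun hp => hdisj p hp p (List.mem_singleton.mpr rfl) rfl
    rw [List.foldl_append, List.foldl_cons, List.foldl_nil]
    have hitems := ih hL'
    have hkeys : (L'.foldl (stepA grid) PySem.Dict.empty).keys
        = PySem.List.dedup (L'.map (cellF grid)) := by
      simp [PySem.Dict.keys, hitems, List.map_map, Function.comp_def]
    have hknodup : (L'.foldl (stepA grid) PySem.Dict.empty).keys.Nodup := by
      rw [hkeys]; exact PySem.List.nodup_dedup _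
    have hdedup : PySem.List.dedup ((L' ++ [p]).map (cellF grid))
        = PySem.Set.add (PySem.List.dedup (L'.map (cellF grid))) (cellF grid p) := by
      rw [List.map_append, List.map_singleton, PySem.List.dedup_eq_ofList,
        PySem.Set.ofList_append_singleton, ← PySem.List.dedup_eq_ofList]
    by_cases hcD : cellF grid p ∈ L'.map (cellF grid)
    · -- the color already has a group
      have hcontains : (L'.foldl (stepA grid) PySem.Dict.empty).contains (cellF grid p) = true := by
        rw [PySem.Dict.contains_iff_mem_keys, hkeys, PySem.List.mem_dedup]; exact hcD
      have hget : (L'.foldl (stepA grid) PySem.Dict.empty).getD (cellF grid p) PySem.Set.empty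
          = L'.filter (fun q => cellF grid q == cellF grid p) := by
        rw [PySem.Dict.getD_eq_get?_getD,
          PySem.Dict.get?_of_mem_items _ (k := cellF grid p)
            (v := L'.filter (fun q => cellF grid q == cellF grid p)) ?_ hknodup]
        · rfl
        · rw [hitems]
          exact List.mem_map.mpr ⟨cellF grid p, (PySem.List.mem_dedup _ _).mpr hcD, rfl⟩
      have hadd : PySem.Set.add (L'.filter (fun q => cellF grid q == cellF grid p)) p
          = L'.filter (fun q => cellF grid q == cellF grid p) ++ [p] :=
        PySem.Set.add_of_not_mem (fun hp => hpL' (List.mem_of_mem_filter hp))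
      simp only [stepA, if_pos hcontains, hget, hadd]
      rw [PySem.Dict.items_insert_of_contains _ _ hcontains, hitems, List.map_map, hdedup,
        PySem.Set.add_of_mem (by rw [PySem.List.mem_dedup]; exact hcD)]
      refine List.map_congr_left ?_
      intro c' _
      simp only [Function.comp_def]
      by_cases hcc : c' = cellF grid p
      · subst hcc
        simp [List.filter_append]
      · have hne : (c' == cellF grid p) = false := by simpa using hcc
        have hne2 : (cellF grid p == c') = false := by simpa using (fun h => hcc h.symm)
        simp [hne, hne2, List.filter_append]
    · -- a new color: a fresh singleton group is appended
      have hcont : (L'.foldl (stepA grid) PySem.Dict.empty).contains (cellF grid p) = false := by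
        rw [Bool.eq_false_iff]
        intro h
        exact hcD ((PySem.List.mem_dedup _ _).mp (by rw [← hkeys]; exact (PySem.Dict.contains_iff_mem_keys _ _).mp h))
      have hfilterL' : L'.filter (fun q => cellF grid q == cellF grid p) = [] := by
        rw [List.filter_eq_nil_iff]
        intro q hq hqc
        exact hcD (List.mem_map.mpr ⟨q, hq, by simpa using hqc⟩)
      have hnc : ¬((L'.foldl (stepA grid) PySem.Dict.empty).contains (cellF grid p) = true) := by
        simp [hcont]
      simp only [stepA, if_neg hnc, PySem.Dict.getD_insert_self]
      have haddE : PySem.Set.add (PySem.Set.empty : PySem.Set (Int × Int)) p = [p] := rfl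
      rw [haddE]
      rw [PySem.Dict.items_insert_of_contains _ _ (PySem.Dict.contains_insert_self _ _ _),
        PySem.Dict.items_insert_of_not_contains _ _ hcont, hitems, hdedup,
        PySem.Set.add_of_not_mem (by rw [PySem.List.mem_dedup]; exact hcD)]
      rw [List.map_append, List.map_append, List.map_map]
      congr 1
      · refine List.map_congr_left ?_
        intro c' hc'
        have hcmem : c' ∈ L'.map (cellF grid) := (PySem.List.mem_dedup _ _).mp hc'
        have hne : (c' == cellF grid p) = false := by
          simp only [beq_eq_false_iff_ne, ne_eq]
          intro h; exact hcD (h ▸ hcmem)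
        have hne2 : (cellF grid p == c') = false := by
          simp only [beq_eq_false_iff_ne, ne_eq]
          intro h; exact hcD (h ▸ hcmem)
        simp only [Function.comp_def, hne, List.filter_append]
        simp [hne2]
      · simp [List.filter_append, hfilterL']

def hasAdj (S : List (Int × Int)) : Bool :=
  S.any (fun p => neighbours.any (fun d => decide ((p.1 + d.1, p.2 + d.2) ∈ S)))

lemma colorCntOuter_eq (S T : List (Int × Int)) (hT : ∀ p ∈ T, p ∈ S) :
    colorCntOuter S T
      = if T.any (fun p => neighbours.any (fun d => decide ((p.1 + d.1, p.2 + d.2) ∈ S))) then 2 else 1 := by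
  have hinner : ∀ p (ds : List (Int × Int)), colorCntInner p S ds
      = if ds.any (fun d => decide ((p.1 + d.1, p.2 + d.2) ∈ S)) then some 2 else none := by
    intro p ds
    induction ds with
    | nil => simp [colorCntInner]
    | cons d rest ih2 =>
      by_cases h : (p.1 + d.1, p.2 + d.2) ∈ S
      · simp [colorCntInner, h]
      · have hf : decide ((p.1 + d.1, p.2 + d.2) ∈ S) = false := by simpa using h
        simp only [colorCntInner, if_neg h, ih2, List.any_cons, hf, Bool.false_or]
  induction T with
  | nil => simp [colorCntOuter]
  | cons p rest ih =>
    have hrest := ih (fun q hq => hT q (List.mem_cons_of_mem _ hq))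
    simp only [colorCntOuter]
    rw [hinner p neighbours]
    by_cases h : (neighbours.any fun d => decide ((p.1 + d.1, p.2 + d.2) ∈ S)) = true
    · rw [if_pos h]
      simp [List.any_cons, h]
    · have hf : (neighbours.any fun d => decide ((p.1 + d.1, p.2 + d.2) ∈ S)) = false := by
        rwa [Bool.not_eq_true] at h
      rw [if_neg h]
      simp only [List.any_cons, hrest, Bool.or_eq_true]
      split_ifs with h1 h2
      all_goals try rfl
      all_goals simp_all
      all_goals aesop

lemma color_cnt_eq (S : PySem.Set (Int × Int)) : color_cnt S = if hasAdj S then 2 else 1 := by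
  unfold color_cnt hasAdj
  exact colorCntOuter_eq S S (fun p hp => hp)

lemma sum_two_one (l : List Int) (p : Int → Bool) :
    (l.map (fun c => if p c then (2 : Int) else 1)).sum = (l.length : Int) + (l.countP p : Int) := by
  induction l with
  | nil => simp
  | cons x t ih =>
    rw [List.map_cons, List.sum_cons, ih, List.countP_cons]
    by_cases h : p x <;> simp [h] <;> omega

lemma mem_addIf (b : Prop) [Decidable b] (s : PySem.Set Int) (c c' : Int) :
    c' ∈ addIf b s c ↔ c' ∈ s ∨ (b ∧ c' = c) := by
  unfold addIf
  split_ifs with h <;> simp [PySem.Set.mem_add, h]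

lemma nodup_addIf (b : Prop) [Decidable b] (s : PySem.Set Int) (c : Int) (hs : s.Nodup) :
    (addIf b s c).Nodup := by
  unfold addIf
  split_ifs with h
  · exact PySem.Set.nodup_add _ _ hs
  · exact hs

lemma mem_stepB (n m : Int) (grid : List (List Int)) (s : PySem.Set Int) (p : Int × Int)
    (c : Int) :
    c ∈ stepB n m grid s p ↔ c ∈ s ∨ (cellF grid p = c ∧
      ((p.2 + 1 < m ∧ cellAt grid p.1 (p.2 + 1) = c) ∨
       (p.1 + 1 < n ∧ cellAt grid (p.1 + 1) p.2 = c))) := by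
  simp only [stepB, mem_addIf]
  constructor
  · rintro ((h | ⟨⟨h1, h2⟩, rfl⟩) | ⟨⟨h1, h2⟩, rfl⟩)
    · exact Or.inl h
    · exact Or.inr ⟨rfl, Or.inl ⟨h1, h2⟩⟩
    · exact Or.inr ⟨rfl, Or.inr ⟨h1, h2⟩⟩
  · rintro (h | ⟨rfl, (⟨h1, h2⟩ | ⟨h1, h2⟩)⟩)
    · exact Or.inl (Or.inl h)
    · exact Or.inl (Or.inr ⟨⟨h1, h2⟩, rfl⟩)
    · exact Or.inr ⟨⟨h1, h2⟩, rfl⟩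

lemma mem_foldl_stepB (n m : Int) (grid : List (List Int)) (L : List (Int × Int))
    (s : PySem.Set Int) (c : Int) :
    c ∈ L.foldl (stepB n m grid) s ↔ c ∈ s ∨ ∃ p ∈ L, cellF grid p = c ∧
      ((p.2 + 1 < m ∧ cellAt grid p.1 (p.2 + 1) = c) ∨
       (p.1 + 1 < n ∧ cellAt grid (p.1 + 1) p.2 = c)) := by
  induction L generalizing s with
  | nil => simp
  | cons p rest ih =>
    rw [List.foldl_cons, ih]
    rw [mem_stepB]
    constructor
    · rintro ((h | hp) | ⟨q, hq, hqc, hadj⟩)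
      · exact Or.inl h
      · exact Or.inr ⟨p, List.mem_cons_self .., hp⟩
      · exact Or.inr ⟨q, List.mem_cons_of_mem _ hq, hqc, hadj⟩
    · rintro (h | ⟨q, hq, hqc, hadj⟩)
      · exact Or.inl (Or.inl h)
      · rcases List.mem_cons.mp hq with rfl | hq'
        · exact Or.inl (Or.inr ⟨hqc, hadj⟩)
        · exact Or.inr ⟨q, hq', hqc, hadj⟩

lemma nodup_foldl_stepB (n m : Int) (grid : List (List Int)) (L : List (Int × Int))
    (s : PySem.Set Int) (hs : s.Nodup) : (L.foldl (stepB n m grid) s).Nodup := by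
  induction L generalizing s with
  | nil => exact hs
  | cons p rest ih =>
    rw [List.foldl_cons]
    exact ih _ (nodup_addIf _ _ _ (nodup_addIf _ _ _ hs))

-- symmetry: a color has a 4-neighbour adjacent pair iff some cell of it has an equal right/down neighbour
lemma adj_iff (n m : Int) (grid : List (List Int)) (c : Int) :
    (hasAdj ((cellsOf n m).filter (fun p => cellF grid p == c)) = true)
      ↔ ∃ p ∈ cellsOf n m, cellF grid p = c ∧
          ((p.2 + 1 < m ∧ cellAt grid p.1 (p.2 + 1) = c) ∨
           (p.1 + 1 < n ∧ cellAt grid (p.1 + 1) p.2 = c)) := by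
  unfold hasAdj
  rw [List.any_eq_true]
  constructor
  · rintro ⟨p, hp, hd⟩
    rw [List.mem_filter, beq_iff_eq] at hp
    obtain ⟨hpL, hpc⟩ := hp
    have hpb := mem_cellsOf.mp hpL
    simp only [neighbours, List.any_cons, List.any_nil, Bool.or_false, Bool.or_eq_true,
      decide_eq_true_eq, List.mem_filter, beq_iff_eq, mem_cellsOf, cellF, add_zero] at hd
    rcases hd with ⟨⟨hb1, hb2, hb3, hb4⟩, hc1⟩ | ⟨⟨hb1, hb2, hb3, hb4⟩, hc1⟩ |
      ⟨⟨hb1, hb2, hb3, hb4⟩, hc1⟩ | ⟨⟨hb1, hb2, hb3, hb4⟩, hc1⟩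
    · -- neighbour below: p itself has an equal down neighbour
      exact ⟨p, hpL, hpc, Or.inr ⟨by omega, hc1⟩⟩
    · -- neighbour above: that cell has an equal down neighbour (namely p)
      refine ⟨(p.1 + -1, p.2), mem_cellsOf.mpr ⟨hb1, by omega, hb3, hb4⟩, hc1, Or.inr ⟨by omega, ?_⟩⟩
      rw [show p.1 + -1 + 1 = p.1 from by ring]
      exact hpc
    · -- neighbour to the right: p itself has an equal right neighbour
      exact ⟨p, hpL, hpc, Or.inl ⟨by omega, hc1⟩⟩
    · -- neighbour to the left: that cell has an equal right neighbour (namely p)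
      refine ⟨(p.1, p.2 + -1), mem_cellsOf.mpr ⟨hb1, hb2, hb3, by omega⟩, hc1, Or.inl ⟨by omega, ?_⟩⟩
      rw [show p.2 + -1 + 1 = p.2 from by ring]
      exact hpc
  · rintro ⟨p, hpL, hpc, ⟨hb, hcell⟩ | ⟨hb, hcell⟩⟩
    · -- equal right neighbour: direction (0, 1)
      have hpb := mem_cellsOf.mp hpL
      refine ⟨p, List.mem_filter.mpr ⟨hpL, by simpa using hpc⟩,
        ?_⟩
      simp only [neighbours, List.any_cons, List.any_nil, Bool.or_false, Bool.or_eq_true,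
        decide_eq_true_eq, List.mem_filter, beq_iff_eq, mem_cellsOf, cellF, add_zero]
      exact Or.inr (Or.inr (Or.inl ⟨⟨by omega, by omega, by omega, by omega⟩, hcell⟩))
    · -- equal down neighbour: direction (1, 0)
      have hpb := mem_cellsOf.mp hpL
      refine ⟨p, List.mem_filter.mpr ⟨hpL, by simpa using hpc⟩, ?_⟩
      simp only [neighbours, List.any_cons, List.any_nil, Bool.or_false, Bool.or_eq_true,
        decide_eq_true_eq, List.mem_filter, beq_iff_eq, mem_cellsOf, cellF, add_zero]
      exact Or.inl ⟨⟨by omega, by omega, by omega, by omega⟩, hcell⟩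

lemma adjlen (n m : Int) (grid : List (List Int)) :
    ((cellsOf n m).foldl (stepB n m grid) PySem.Set.empty).length
      = (PySem.List.dedup ((cellsOf n m).map (cellF grid))).countP
          (fun c => hasAdj ((cellsOf n m).filter (fun p => cellF grid p == c))) := by
  rw [List.countP_eq_length_filter]
  apply List.Perm.length_eq
  rw [List.perm_ext_iff_of_nodup (nodup_foldl_stepB n m grid _ _ (by simp [PySem.Set.empty]))
    (List.Nodup.filter _ (PySem.List.nodup_dedup _))]
  intro a
  rw [List.mem_filter, mem_foldl_stepB]
  simp only [PySem.Set.empty, List.not_mem_nil, false_or]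
  constructor
  · rintro ⟨p, hp, hpc, hadj⟩
    refine ⟨?_, (adj_iff n m grid a).mpr ⟨p, hp, hpc, hadj⟩⟩
    rw [PySem.List.mem_dedup]
    exact List.mem_map.mpr ⟨p, hp, hpc⟩
  · rintro ⟨_, h⟩
    exact (adj_iff n m grid a).mp h

lemma a_val (n m : Int) (grid : List (List Int)) :
    no_of_iter n m grid =
      (if ((PySem.List.dedup ((cellsOf n m).map (cellF grid))).length : Int)
          + ((PySem.List.dedup ((cellsOf n m).map (cellF grid))).countP
              (fun c => hasAdj ((cellsOf n m).filter (fun p => cellF grid p == c))) : Int)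
          > ((PySem.List.dedup ((cellsOf n m).map (cellF grid))).length : Int)
       then ((PySem.List.dedup ((cellsOf n m).map (cellF grid))).length : Int)
          + ((PySem.List.dedup ((cellsOf n m).map (cellF grid))).countP
              (fun c => hasAdj ((cellsOf n m).filter (fun p => cellF grid p == c))) : Int) - 2
       else ((PySem.List.dedup ((cellsOf n m).map (cellF grid))).length : Int)
          + ((PySem.List.dedup ((cellsOf n m).map (cellF grid))).countP
              (fun c => hasAdj ((cellsOf n m).filter (fun p => cellF grid p == c))) : Int) - 1) := by
  rw [a_fold_eq]
  have hitems := groupItems grid (cellsOf n m) (nodup_cellsOf n m)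
  simp only [PySem.Dict.values, PySem.Dict.size, hitems, List.map_map]
  rw [PySem.List.foldl_add (g := color_cnt)]
  simp only [List.map_map, Function.comp_def]
  rw [List.map_congr_left (g := fun c =>
    if hasAdj ((cellsOf n m).filter (fun p => cellF grid p == c)) then (2 : Int) else 1)
    (fun c _ => color_cnt_eq _)]
  rw [sum_two_one]
  simp only [List.length_map, zero_add]

lemma b_val (n m : Int) (grid : List (List Int)) :
    no_of_iter_alt n m grid =
      (if (((cellsOf n m).foldl (stepB n m grid) PySem.Set.empty).length : Int) ≠ 0
       then ((PySem.List.dedup ((cellsOf n m).map (cellF grid))).length : Int)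
          + (((cellsOf n m).foldl (stepB n m grid) PySem.Set.empty).length : Int) - 2
       else ((PySem.List.dedup ((cellsOf n m).map (cellF grid))).length : Int) - 1) := by
  rw [alt_fold_eq]
  rw [PySem.List.foldl_prod_mk (f := fun s p => PySem.Set.add s (cellF grid p))
    (g := stepB n m grid)]
  rw [show (PySem.Set.empty : PySem.Set Int) = ([] : List Int) from rfl]
  rw [← PySem.Set.update_map_eq_foldl_add, PySem.Set.update_nil_left,
    ← PySem.List.dedup_eq_ofList]

-- ===== VERDICT (by name: the statement is the Claim_ definition above) =====
theorem no_of_iter_spec : Claim_equal_no_of_iter := by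
  intro n m grid _ _
  unfold Spec_no_of_iter
  rw [a_val, b_val, adjlen]
  set D := (PySem.List.dedup ((cellsOf n m).map (cellF grid))).length with hD
  set k := (PySem.List.dedup ((cellsOf n m).map (cellF grid))).countP
      (fun c => hasAdj ((cellsOf n m).filter (fun p => cellF grid p == c))) with hk
  split_ifs with h1 h2 h2 <;> omega
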